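-- pv_equiv track=rewrite | github.com/j-wut/advent-2024 | d2/day-2.py | isDecreasing
-- ===== SOURCE A (Python) =====
-- def isDecreasing(input: list[int], limit: int, dampener: int = 0):
--   for i in range(1,len(input)):
--     if input[i] >= input[i-1] or input[i] - input[i-1] < limit:
--       if dampener:
--         return isDecreasing(input[i-1:i]+input[i+1:], limit, dampener - 1) or isDecreasing(input[0:i-1] + input[i:], limit, dampener - 1)
--       else:
--         return False
--   return True
-- ===== SOURCE B (Python) =====
-- def _first_violation(seq, limit):
--     for i in range(1, len(seq)):
--         if seq[i] >= seq[i-1] or seq[i] - seq[i-1] < limit: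
--             return i
--     return None
--
-- def isDecreasing(input: list[int], limit: int, dampener: int = 0):
--     stack = [(input, dampener)]
--     while stack:
--         seq, d = stack.pop()
--         i = _first_violation(seq, limit)
--         if i is None:
--             return True
--         if d:
--             stack.append((seq[:i-1] + seq[i:], d - 1))
--             stack.append(([seq[i-1]] + seq[i+1:], d - 1))
--     return False
-- ===== Notes on version B (the rewrite author's own statement) =====
-- stated objective: alternative
-- what changed: A's recursive DFS (a for-loop that recurses on the first violating pair with a short-circuit or) is replaced by an iterative explicit-stack worklist over (sequence, remaining-budget) states with a separate first-violation scanner helper.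
import Mathlib
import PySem

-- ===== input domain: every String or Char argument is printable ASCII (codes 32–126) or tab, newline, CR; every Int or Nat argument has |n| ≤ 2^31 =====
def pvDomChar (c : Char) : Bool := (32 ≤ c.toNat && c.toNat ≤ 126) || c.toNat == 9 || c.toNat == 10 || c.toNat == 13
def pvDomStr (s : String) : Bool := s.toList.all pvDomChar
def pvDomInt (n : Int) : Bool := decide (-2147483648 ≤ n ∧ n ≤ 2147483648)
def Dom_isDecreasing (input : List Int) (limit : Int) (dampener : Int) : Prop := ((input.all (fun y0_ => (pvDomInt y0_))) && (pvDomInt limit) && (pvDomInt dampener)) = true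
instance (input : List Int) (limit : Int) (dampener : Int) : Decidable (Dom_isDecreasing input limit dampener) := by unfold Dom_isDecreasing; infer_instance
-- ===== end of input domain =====

-- B replaces A's first-violation recursion by an explicit-stack DFS over (list, budget) states
-- with a separate first-violation scanner; same return value, same cost class (objective: alternative).

-- ===== PORT A =====
-- A's branch lists, written with A's own slice expressions (input[i-1:i]+input[i+1:] and
-- input[0:i-1]+input[i:], here with j = i-1 : Nat, so i = j+1 ranges over range(1, len)).
def pvBranch1 (input : List Int) (j : Nat) : List Int :=
  PySem.List.slice input (some (j : Int)) (some ((j : Int) + 1)) ++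
  PySem.List.slice input (some ((j : Int) + 2)) none

def pvBranch2 (input : List Int) (j : Nat) : List Int :=
  PySem.List.slice input (some 0) (some (j : Int)) ++
  PySem.List.slice input (some ((j : Int) + 1)) none

-- the 'for i in range(1, len(input))' loop of A, index i = j + 1
def isDecLoopA (limit dampener : Int) (input : List Int) (j : Nat) : Bool :=
  if j + 1 < input.length then
    if decide (PySem.List.pyGetD input (j : Int) 0 ≤ PySem.List.pyGetD input ((j : Int) + 1) 0) ||
       decide (PySem.List.pyGetD input ((j : Int) + 1) 0 - PySem.List.pyGetD input (j : Int) 0 < limit) then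
      if dampener ≠ 0 then
        isDecLoopA limit (dampener - 1) (pvBranch1 input j) 0 ||
        isDecLoopA limit (dampener - 1) (pvBranch2 input j) 0
      else false
    else isDecLoopA limit dampener input (j + 1)
  else true
termination_by (input.length, input.length - j)
decreasing_by
  · left
    rw [pvBranch1, show ((j : Int) + 1) = ((j + 1 : Nat) : Int) by push_cast; ring,
        show ((j : Int) + 2) = ((j + 2 : Nat) : Int) by push_cast; ring,
        PySem.List.slice_natCast, PySem.List.slice_from_natCast]
    simp only [List.length_append, List.length_take, List.length_drop]
    omega
  · left
    rw [pvBranch2, PySem.List.slice_zero_start,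
        show ((j : Int) + 1) = ((j + 1 : Nat) : Int) by push_cast; ring,
        PySem.List.slice_to_natCast, PySem.List.slice_from_natCast]
    simp only [List.length_append, List.length_take, List.length_drop]
    omega
  · right
    omega

def isDecreasing (input : List Int) (limit : Int) (dampener : Int) : Bool :=
  isDecLoopA limit dampener input 0

-- ===== PORT B =====
-- _first_violation: first index i ≥ 1 with seq[i] >= seq[i-1] or seq[i] - seq[i-1] < limit (i = j + 1)
def pvFirstViolation (limit : Int) (seq : List Int) (j : Nat) : Option Nat :=
  if j + 1 < seq.length then
    if decide (PySem.List.pyGetD seq (j : Int) 0 ≤ PySem.List.pyGetD seq ((j : Int) + 1) 0) ||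
       decide (PySem.List.pyGetD seq ((j : Int) + 1) 0 - PySem.List.pyGetD seq (j : Int) 0 < limit) then
      some (j + 1)
    else pvFirstViolation limit seq (j + 1)
  else none
termination_by seq.length - j

-- bound on the returned index; needed by altGo's termination proof (cited in decreasing_by)
theorem pvFirstViolation_lt {limit : Int} {seq : List Int} {j i : Nat}
    (h : pvFirstViolation limit seq j = some i) : 1 ≤ i ∧ i < seq.length := by
  fun_induction pvFirstViolation limit seq j with
  | case1 j hlen hc => simp at h; omega
  | case2 j hlen hc ih => exact ih h
  | case3 j hlen => simp at h

-- the while-loop over the explicit stack; head of the list = top of the stack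
def altGo (limit : Int) (stack : List (List Int × Int)) : Bool :=
  match stack with
  | [] => false
  | (seq, d) :: rest =>
    match h : pvFirstViolation limit seq 0 with
    | none => true
    | some i =>
      if d ≠ 0 then
        altGo limit (([PySem.List.pyGetD seq ((i : Int) - 1) 0] ++ seq.drop (i + 1), d - 1) ::
                     (seq.take (i - 1) ++ seq.drop i, d - 1) :: rest)
      else altGo limit rest
termination_by (stack.map (fun p => 3 ^ p.1.length)).sum
decreasing_by
  all_goals obtain ⟨h1, h2⟩ := pvFirstViolation_lt h
  all_goals simp
  all_goals
    have e1 : (3:Nat) ^ (seq.length - (i + 1)) * 3 ≤ 3 ^ (seq.length - 1) := by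
      rw [← pow_succ]
      exact Nat.pow_le_pow_right (by norm_num) (by omega)
    have e2 : (3:Nat) ^ (min (i - 1) seq.length + (seq.length - i)) ≤ 3 ^ (seq.length - 1) :=
      Nat.pow_le_pow_right (by norm_num) (by omega)
    have e3 : (3:Nat) ^ seq.length = 3 * 3 ^ (seq.length - 1) := by
      rw [← pow_succ']
      congr 1
      omega
    have e4 : 0 < (3:Nat) ^ (seq.length - 1) := Nat.pow_pos (by norm_num)
    omega

def isDecreasing_alt (input : List Int) (limit : Int) (dampener : Int) : Bool :=
  altGo limit [(input, dampener)]

-- ===== PRECONDITION & SPEC =====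
def Spec_isDecreasing (input : List Int) (limit : Int) (dampener : Int) (out : Bool) : Prop := out = isDecreasing_alt input limit dampener
instance (input : List Int) (limit : Int) (dampener : Int) (out : Bool) : Decidable (Spec_isDecreasing input limit dampener out) := by unfold Spec_isDecreasing; infer_instance

-- ===== CLAIM (what is proved, stated in full; the proofs are below) =====
def Claim_equal_isDecreasing : Prop := ∀ (input : List Int) (limit : Int) (dampener : Int), Dom_isDecreasing input limit dampener → Spec_isDecreasing input limit dampener (isDecreasing input limit dampener)

-- ===== LEMMAS AND PROOFS =====

-- A's loop, characterised by B's first-violation scanner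
theorem isDecLoopA_eq_fv (limit dampener : Int) (input : List Int) (j : Nat) :
    isDecLoopA limit dampener input j =
      match pvFirstViolation limit input j with
      | none => true
      | some i =>
        if dampener ≠ 0 then
          isDecLoopA limit (dampener - 1) (pvBranch1 input (i - 1)) 0 ||
          isDecLoopA limit (dampener - 1) (pvBranch2 input (i - 1)) 0
        else false := by
  fun_induction pvFirstViolation limit input j with
  | case1 j hlen hc =>
    rw [isDecLoopA, if_pos hlen, if_pos hc]
    by_cases hd : dampener = 0 <;> simp [hd]
  | case2 j hlen hc ih =>
    rw [isDecLoopA, if_pos hlen, if_neg hc]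
    exact ih
  | case3 j hlen =>
    rw [isDecLoopA, if_neg hlen]

-- A's slice branches equal B's list-operation branches (for a genuine violation index)
theorem branch1_eq (seq : List Int) (i : Nat) (h1 : 1 ≤ i) (h2 : i < seq.length) :
    pvBranch1 seq (i - 1) = [PySem.List.pyGetD seq ((i : Int) - 1) 0] ++ seq.drop (i + 1) := by
  unfold pvBranch1
  have hj : i - 1 < seq.length := by omega
  have hd : seq.drop (i - 1) = seq[i - 1] :: seq.drop (i - 1 + 1) := List.drop_eq_getElem_cons hj
  have hc1 : ((i - 1 : Nat) : Int) + 1 = ((i : Nat) : Int) := by omega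
  have hc2 : ((i - 1 : Nat) : Int) + 2 = ((i + 1 : Nat) : Int) := by push_cast; omega
  have hc3 : ((i : Nat) : Int) - 1 = ((i - 1 : Nat) : Int) := by omega
  rw [hc1, hc2, hc3, PySem.List.slice_natCast, PySem.List.slice_from_natCast,
      PySem.List.pyGetD_natCast]
  have : i - (i - 1) = 1 := by omega
  rw [this, hd, List.take_succ_cons, List.take_zero]
  simp [hj]

theorem branch2_eq (seq : List Int) (i : Nat) (h1 : 1 ≤ i) (_h2 : i < seq.length) :
    pvBranch2 seq (i - 1) = seq.take (i - 1) ++ seq.drop i := by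
  unfold pvBranch2
  have hc1 : ((i - 1 : Nat) : Int) + 1 = ((i : Nat) : Int) := by omega
  rw [hc1, PySem.List.slice_zero_start, PySem.List.slice_to_natCast,
      PySem.List.slice_from_natCast]

-- the stack loop computes the disjunction of A over the stack entries
theorem altGo_eq_any (limit : Int) (stack : List (List Int × Int)) :
    altGo limit stack = stack.any (fun p => isDecLoopA limit p.2 p.1 0) := by
  fun_induction altGo limit stack with
  | case1 => simp
  | case2 seq d rest h =>
    simp [isDecLoopA_eq_fv limit d seq 0, h]
  | case3 seq d rest i h hd ih =>
    obtain ⟨h1, h2⟩ := pvFirstViolation_lt h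
    rw [ih]
    simp [isDecLoopA_eq_fv limit d seq 0, h, hd,
          branch1_eq seq i h1 h2, branch2_eq seq i h1 h2, Bool.or_assoc]
  | case4 seq d rest i h hd ih =>
    rw [ih]
    simp [isDecLoopA_eq_fv limit d seq 0, h, hd]

-- ===== VERDICT (by name: the statement is the Claim_ definition above) =====
theorem isDecreasing_spec : Claim_equal_isDecreasing := by
  intro input limit dampener _
  unfold Spec_isDecreasing isDecreasing isDecreasing_alt
  rw [altGo_eq_any]
  simp
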